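-- pv_equiv track=rewrite | github.com/sultanalieva-s/quote-analysis-api | main/quote_analysis.py | get_longest_words
-- ===== SOURCE A (Python) =====
-- def get_longest_words(quote):
--     words = quote.split(" ")
--     max_lengths = []
--     c = 3
--     # TODO: refactor the if statement
--     if len(words) == 0 or len(words) == 1 or len(words) == 2 or len(words) == 3:
--         c = len(words)
--     while c:
--         max_length = 0
--         max_length_word_index = 0
--
--         for i in range(0, len(words)):
--             if len(words[i]) > max_length:
--                 max_length = len(words[i])
--                 max_length_word_index = i
--
--         max_lengths.append(words[max_length_word_index])
--         words.pop(max_length_word_index)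
--         c -= 1
--     return ' '.join(max_lengths)
-- ===== SOURCE B (Python) =====
-- def get_longest_words(quote):
--     words = quote.split(" ")
--     return ' '.join(sorted(words, key=lambda w: -len(w))[:3])
-- ===== Notes on version B (the rewrite author's own statement) =====
-- stated objective: simpler
-- what changed: A's while-loop that rescans the whole word list for the first longest word and pops it (up to 3 times) is replaced by one stable sort on descending word length followed by taking the first three words.
import Mathlib
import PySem

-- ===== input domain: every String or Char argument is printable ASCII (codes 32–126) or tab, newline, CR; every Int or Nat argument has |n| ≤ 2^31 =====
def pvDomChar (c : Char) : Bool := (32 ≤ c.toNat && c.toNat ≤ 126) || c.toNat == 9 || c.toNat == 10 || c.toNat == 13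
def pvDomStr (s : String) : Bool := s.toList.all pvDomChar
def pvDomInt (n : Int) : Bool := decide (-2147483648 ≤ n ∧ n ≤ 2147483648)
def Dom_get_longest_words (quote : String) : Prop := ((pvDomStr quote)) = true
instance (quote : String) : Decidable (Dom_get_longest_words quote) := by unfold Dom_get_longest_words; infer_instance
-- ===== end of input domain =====

-- B replaces A's repeated first-max scan-and-pop loop by one stable sort on descending
-- length followed by taking the first three words (objective: simpler).

-- ===== PORT A =====
-- the inner 'for i in range(0, len(words))' scan: state (i, max_length, max_length_word_index)
def pvScanA : List String → Int → Int → Int → Int × Int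
  | [], _, ml, mi => (ml, mi)
  | w :: t, i, ml, mi =>
    if PySem.Str.len w > ml then pvScanA t (i + 1) (PySem.Str.len w) i
    else pvScanA t (i + 1) ml mi

-- the 'while c' loop: append words[max_length_word_index] to max_lengths, pop it, c -= 1
def pvWhileA : Nat → List String → List String → List String
  | 0, _, acc => acc
  | c + 1, words, acc =>
    match PySem.List.pop? words (pvScanA words 0 0 0).2 with
    | some (w, rest) => pvWhileA c rest (acc ++ [w])
    | none => acc   -- unreachable: A only runs the loop with c ≤ len(words)

def get_longest_words (quote : String) : String :=
  match PySem.Str.split? quote " " with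
  | some words =>
    let c : Nat :=
      if words.length = 0 ∨ words.length = 1 ∨ words.length = 2 ∨ words.length = 3
      then words.length else 3
    PySem.Str.join " " (pvWhileA c words [])
  | none => ""   -- unreachable: the separator " " is nonempty

-- ===== PORT B =====
def get_longest_words_alt (quote : String) : String :=
  match PySem.Str.split? quote " " with
  | some words =>
    PySem.Str.join " "
      (PySem.List.slice (PySem.List.sorted words (fun w => -(PySem.Str.len w)) false)
        none (some 3))
  | none => ""   -- unreachable: the separator " " is nonempty

-- ===== PRECONDITION & SPEC =====
def Spec_get_longest_words (quote : String) (out : String) : Prop := out = get_longest_words_alt quote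
instance (quote : String) (out : String) : Decidable (Spec_get_longest_words quote out) := by unfold Spec_get_longest_words; infer_instance

-- ===== CLAIM (what is proved, stated in full; the proofs are below) =====
def Claim_equal_get_longest_words : Prop := ∀ (quote : String), Dom_get_longest_words quote → Spec_get_longest_words quote (get_longest_words quote)

-- ===== LEMMAS AND PROOFS =====

theorem len_nonneg (s : String) : 0 ≤ PySem.Str.len s := by
  rw [PySem.Str.len_eq]; positivity

-- A's scan: the running maximum bounds every scanned word, and the result is either the
-- initial state or the length/index of some word of the list
theorem pvScanA_spec (ws : List String) (i ml mi : Int) :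
    (pvScanA ws i ml mi = (ml, mi) ∨
      ∃ (j : Nat) (hj : j < ws.length), pvScanA ws i ml mi = (PySem.Str.len (ws[j]'hj), i + j)) ∧
    ml ≤ (pvScanA ws i ml mi).1 ∧ ∀ w ∈ ws, PySem.Str.len w ≤ (pvScanA ws i ml mi).1 := by
  induction ws generalizing i ml mi with
  | nil => simp [pvScanA]
  | cons w t ih =>
    simp only [pvScanA]
    split
    · rename_i hlt
      obtain ⟨hd, hml, hall⟩ := ih (i + 1) (PySem.Str.len w) i
      refine ⟨?_, by omega, ?_⟩
      · rcases hd with h | ⟨j, hj, h⟩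
        · exact Or.inr ⟨0, by simp, by simpa using h⟩
        · refine Or.inr ⟨j + 1, by simpa using hj, ?_⟩
          rw [h]; simp [Prod.ext_iff]; ring
      · intro x hx
        rcases List.mem_cons.mp hx with rfl | hx
        · exact hml
        · exact hall x hx
    · rename_i hlt
      obtain ⟨hd, hml, hall⟩ := ih (i + 1) ml mi
      refine ⟨?_, hml, ?_⟩
      · rcases hd with h | ⟨j, hj, h⟩
        · exact Or.inl h
        · refine Or.inr ⟨j + 1, by simpa using hj, ?_⟩
          rw [h]; simp [Prod.ext_iff]; ring
      · intro x hx
        rcases List.mem_cons.mp hx with rfl | hx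
        · omega
        · exact hall x hx

-- running the scan over one more, final word
theorem pvScanA_append (ws : List String) (y : String) (i ml mi : Int) :
    pvScanA (ws ++ [y]) i ml mi =
      if (pvScanA ws i ml mi).1 < PySem.Str.len y
      then (PySem.Str.len y, i + ws.length) else pvScanA ws i ml mi := by
  induction ws generalizing i ml mi with
  | nil =>
    simp only [List.nil_append, pvScanA, List.length_nil]
    split
    · simp
    · rfl
  | cons w t ih =>
    simp only [List.cons_append, pvScanA]
    split
    · rw [ih]; split
      · simp [Prod.ext_iff]; ring
      · rfl
    · rw [ih]; split
      · simp [Prod.ext_iff]; ring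
      · rfl

-- on a nonempty list started from (0, 0, 0), A's scan returns the length and index of a
-- word of maximal length
theorem pvScanA_zero (ws : List String) (h : ws ≠ []) :
    ∃ (j : Nat) (hj : j < ws.length), pvScanA ws 0 0 0 = (PySem.Str.len (ws[j]'hj), (j : Int)) ∧
      ∀ w ∈ ws, PySem.Str.len w ≤ PySem.Str.len (ws[j]'hj) := by
  obtain ⟨hd, hml, hall⟩ := pvScanA_spec ws 0 0 0
  rcases hd with h0 | ⟨j, hj, hs⟩
  · have hlen : 0 < ws.length := List.length_pos_iff.mpr h
    refine ⟨0, hlen, ?_, ?_⟩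
    · have h00 : PySem.Str.len (ws[0]'hlen) ≤ 0 := by
        have hh := hall _ (List.getElem_mem hlen); rw [h0] at hh; exact hh
      have hn := len_nonneg (ws[0]'hlen)
      rw [h0]; simp only [Prod.mk.injEq, Nat.cast_zero]; exact ⟨by omega, trivial⟩
    · intro w hw
      have hh := hall w hw; rw [h0] at hh
      have hn := len_nonneg (ws[0]'hlen)
      omega
  · refine ⟨j, hj, by simpa using hs, ?_⟩
    intro w hw
    have := hall w hw
    rw [hs] at this
    exact this

-- selection sort exactly as A performs it: repeatedly pop the first longest word
def pvSel (ws : List String) : List String :=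
  match h : PySem.List.pop? ws (pvScanA ws 0 0 0).2 with
  | some (w, rest) => w :: pvSel rest
  | none => []
termination_by ws.length
decreasing_by
  have hl : rest.length + 1 = ws.length := PySem.List.length_of_pop?_eq_some ws h
  omega

theorem insertBy_cons_true {α : Type} (b : α → α → Bool) (x h : α) (t : List α)
    (hb : b x h = true) : PySem.List.insertBy b x (h :: t) = x :: h :: t := by
  simp [PySem.List.insertBy, hb]

theorem insertBy_cons_false {α : Type} (b : α → α → Bool) (x h : α) (t : List α)
    (hb : b x h = false) : PySem.List.insertBy b x (h :: t) = h :: PySem.List.insertBy b x t := by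
  simp [PySem.List.insertBy, hb]

theorem pvSel_cons (ws : List String) {w : String} {rest : List String}
    (hp : PySem.List.pop? ws (pvScanA ws 0 0 0).2 = some (w, rest)) :
    pvSel ws = w :: pvSel rest := by
  rw [pvSel]
  split
  · rename_i a b heq; rw [hp] at heq; cases heq; rfl
  · rename_i heq; rw [hp] at heq; cases heq

theorem pvSel_nil : pvSel [] = [] := by rw [pvSel]; rfl

-- the key stability fact: popping the FIRST longest word first agrees with stable
-- insertion of the LAST word into the already selection-sorted front
theorem pvSel_append (ws : List String) (y : String) :
    pvSel (ws ++ [y]) =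
      PySem.List.insertBy
        (fun a b => decide ((-(PySem.Str.len a) : Int) < -(PySem.Str.len b))) y (pvSel ws) := by
  induction hws : ws.length using Nat.strong_induction_on generalizing ws with
  | _ n ih =>
  rcases List.eq_nil_or_concat' ws with rfl | hne
  · have hidx : (pvScanA [y] 0 0 0).2 = 0 := by
      simp only [pvScanA]; split <;> rfl
    have hp : PySem.List.pop? [y] (pvScanA [y] 0 0 0).2 = some (y, []) := by
      rw [hidx]
      exact PySem.List.pop?_natCast [y] 0 (by simp)
    rw [show ([] : List String) ++ [y] = [y] from rfl, pvSel_cons [y] hp, pvSel_nil]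
    rfl
  · have hwne : ws ≠ [] := by rcases hne with ⟨a, b, rfl⟩; simp
    obtain ⟨j, hj, hs, hmax⟩ := pvScanA_zero ws hwne
    have happ := pvScanA_append ws y 0 0 0
    rw [hs] at happ
    have hpj : PySem.List.pop? ws (pvScanA ws 0 0 0).2 = some (ws[j]'hj, ws.eraseIdx j) := by
      rw [hs]; exact PySem.List.pop?_natCast ws j hj
    have hself : pvSel ws = ws[j]'hj :: pvSel (ws.eraseIdx j) := pvSel_cons ws hpj
    by_cases hcase : PySem.Str.len (ws[j]'hj) < PySem.Str.len y
    · -- y is strictly longer than every word of ws: it is selected first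
      rw [if_pos hcase] at happ
      have hgy : (ws ++ [y])[ws.length]'(by simp) = y := by simp
      have he : (ws ++ [y]).eraseIdx ws.length = ws := by
        rw [List.eraseIdx_append_of_length_le (Nat.le_refl _)]; simp
      have hp : PySem.List.pop? (ws ++ [y]) (pvScanA (ws ++ [y]) 0 0 0).2 = some (y, ws) := by
        simp only [happ]
        rw [zero_add]
        have h2 := PySem.List.pop?_natCast (ws ++ [y]) ws.length (by simp)
        rw [h2]
        simp [he]
      rw [pvSel_cons (ws ++ [y]) hp, hself]
      have hb : (decide ((-(PySem.Str.len y) : Int) < -(PySem.Str.len (ws[j]'hj)))) = true :=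
        decide_eq_true (by omega)
      rw [insertBy_cons_true _ _ _ _ hb]
    · -- the first longest word of ws is still selected first, y is inserted behind it
      rw [if_neg hcase] at happ
      have hgj : (ws ++ [y])[j]'(by simp; omega) = ws[j]'hj :=
        List.getElem_append_left (bs := [y]) hj
      have herase : (ws ++ [y]).eraseIdx j = ws.eraseIdx j ++ [y] :=
        List.eraseIdx_append_of_lt_length hj [y]
      have hp : PySem.List.pop? (ws ++ [y]) (pvScanA (ws ++ [y]) 0 0 0).2
          = some (ws[j]'hj, ws.eraseIdx j ++ [y]) := by
        rw [happ]
        show PySem.List.pop? (ws ++ [y]) ((j : Nat) : Int) = _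
        rw [PySem.List.pop?_natCast (ws ++ [y]) j (by simp; omega)]
        simp only [hgj, herase]
      rw [pvSel_cons (ws ++ [y]) hp, hself]
      have hrec := ih (ws.eraseIdx j).length
        (by have := List.length_eraseIdx_of_lt hj; omega) (ws.eraseIdx j) rfl
      rw [hrec]
      have hb : (decide ((-(PySem.Str.len y) : Int) < -(PySem.Str.len (ws[j]'hj)))) = false :=
        decide_eq_false (by omega)
      rw [insertBy_cons_false _ _ _ _ hb]

-- A's selection order IS Python's stable sort on the key -len
theorem pvSel_eq_sorted (ws : List String) :
    pvSel ws = PySem.List.sorted ws (fun w => -(PySem.Str.len w)) false := by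
  induction ws using List.reverseRecOn with
  | nil => rw [pvSel_nil]; rfl
  | append_singleton ws y ih =>
    rw [PySem.List.sorted_eq_foldl_insertBy, List.foldl_append,
      ← PySem.List.sorted_eq_foldl_insertBy, pvSel_append, ih]
    rfl

-- A's while-loop takes the first c words of the full selection sort
theorem pvWhileA_take (c : Nat) (ws acc : List String) (hc : c ≤ ws.length) :
    pvWhileA c ws acc = acc ++ (pvSel ws).take c := by
  induction c generalizing ws acc with
  | zero => simp [pvWhileA]
  | succ c ih =>
    have hwne : ws ≠ [] := by intro h; subst h; simp at hc
    obtain ⟨j, hj, hs, _⟩ := pvScanA_zero ws hwne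
    have hpj : PySem.List.pop? ws (pvScanA ws 0 0 0).2 = some (ws[j]'hj, ws.eraseIdx j) := by
      rw [hs]; exact PySem.List.pop?_natCast ws j hj
    have hel : (ws.eraseIdx j).length = ws.length - 1 := List.length_eraseIdx_of_lt hj
    have ih2 := ih (ws.eraseIdx j) (acc ++ [ws[j]'hj]) (by omega)
    rw [pvWhileA, hpj]
    simp only []
    rw [ih2, pvSel_cons ws hpj, List.take_succ_cons, List.append_assoc]
    rfl

-- ===== VERDICT (by name: the statement is the Claim_ definition above) =====
theorem get_longest_words_spec : Claim_equal_get_longest_words := by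
  intro quote _
  unfold Spec_get_longest_words get_longest_words get_longest_words_alt
  cases hs : PySem.Str.split? quote " " with
  | none => rfl
  | some words =>
    simp only
    rw [PySem.List.slice_to _ (by norm_num)]
    congr 1
    set c : Nat := if words.length = 0 ∨ words.length = 1 ∨ words.length = 2 ∨ words.length = 3
      then words.length else 3 with hcdef
    have hcle : c ≤ words.length ∧ (c = words.length ∧ words.length ≤ 3 ∨ c = 3) := by
      rw [hcdef]; split <;> omega
    rw [pvWhileA_take c words [] hcle.1, List.nil_append, pvSel_eq_sorted]
    have hlen := PySem.List.length_sorted words (fun w => -(PySem.Str.len w)) false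
    rcases hcle.2 with ⟨hcw, h3⟩ | hc3 <;> rw [show Int.toNat 3 = 3 from rfl]
    · rw [hcw, List.take_of_length_le (by omega), List.take_of_length_le (by omega)]
    · rw [hc3]
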